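-- pv_equiv track=rewrite | github.com/vitori4th/SIN110 | SIN110_-_ATV4_-_app_grafos/Metodos/caracteristicas.py | tipoGrafo
-- ===== SOURCE A (Python) =====
-- def tipoGrafo(listaAdj):
--     laco = False
--     arestaMultipla = False
--     direcionado = False
--
--     #for aninhado para verificas as caracteristicas do grafo
--     for x in listaAdj:
--         if x in  listaAdj[x]:
--             laco = True
--         for y in listaAdj:
--             if y in listaAdj[x] and not x in listaAdj[y]:
--                     direcionado=True
--             if listaAdj[x].count(y) > 1: #verifica se possui arestas multiplas
--                 arestaMultipla = True
--
--     if not laco and not arestaMultipla: #verifica se possui não tem arestas multiplas e nem laços: GRAFO SIMPLES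
--         return 0 #simples
--     if direcionado: #verifica se é direcionado: DÍGRAFO
--         return 1 #dígrafo
--     if not laco and arestaMultipla: #verifica se possui arestas multiplas e não possui laço: MULTIGRAFO
--         return 2 # multigrafo
--     if laco and arestaMultipla: #verifica se não possui arestas multiplas e possui laço: PSEUDOGRAFO
--         return 3 #pseudografo
-- ===== SOURCE B (Python) =====
-- def tipoGrafo(listaAdj):
--     keys = set(listaAdj)
--     adj = {v: set(nb) for v, nb in listaAdj.items()}
--     laco = False
--     arestaMultipla = False
--     direcionado = False
--     for v, nb in listaAdj.items():
--         if v in adj[v]: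
--             laco = True
--         counts = {}
--         for u in nb:
--             counts[u] = counts.get(u, 0) + 1
--         if any(c > 1 and u in keys for u, c in counts.items()):
--             arestaMultipla = True
--         if any(u in keys and v not in adj[u] for u in adj[v]):
--             direcionado = True
--     if not laco and not arestaMultipla:
--         return 0
--     if direcionado:
--         return 1
--     if arestaMultipla:
--         return 3 if laco else 2
--     return None
-- ===== Notes on version B (the rewrite author's own statement) =====
-- stated objective: faster
-- what changed: Replaces A's nested loop over all key pairs (for each vertex, scanning every vertex for multi-edge counts and asymmetric edges) by one pass per vertex using precomputed neighbour sets, a per-vertex count dict for multiple edges, and set lookups for asymmetry.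
import Mathlib
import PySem

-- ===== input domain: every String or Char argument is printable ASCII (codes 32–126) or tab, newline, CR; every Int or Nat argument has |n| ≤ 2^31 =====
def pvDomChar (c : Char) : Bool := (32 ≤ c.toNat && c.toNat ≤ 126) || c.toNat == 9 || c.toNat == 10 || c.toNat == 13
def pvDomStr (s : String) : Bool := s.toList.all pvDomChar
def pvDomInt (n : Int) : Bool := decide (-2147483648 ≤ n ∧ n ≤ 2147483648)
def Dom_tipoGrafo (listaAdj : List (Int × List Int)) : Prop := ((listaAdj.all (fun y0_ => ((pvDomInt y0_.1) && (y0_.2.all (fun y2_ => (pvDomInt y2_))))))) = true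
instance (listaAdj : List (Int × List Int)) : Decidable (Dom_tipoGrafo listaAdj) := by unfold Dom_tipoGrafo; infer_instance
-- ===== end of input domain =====

-- B replaces A's nested loops over all vertex pairs by one pass per vertex using neighbour sets and a
-- per-vertex count dict (measured faster); equivalence of the returned value is proved on association
-- lists with pairwise-distinct keys (Pre_), the lists that represent a Python dict.

-- ===== PORT A =====
def tipoGrafo (listaAdj : List (Int × List Int)) : Option Int :=
  let d : PySem.Dict Int (List Int) := PySem.Dict.ofList listaAdj
  let ks := PySem.Dict.keys d
  let st :=
    ks.foldl (fun (st : Bool × Bool × Bool) x =>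
      let nx := PySem.Dict.getD d x []
      let laco := if nx.contains x then true else st.1
      let inner :=
        ks.foldl (fun (q : Bool × Bool) y =>
          let dir := if nx.contains y && !((PySem.Dict.getD d y []).contains x) then true else q.2
          let am := if decide (nx.count y > 1) then true else q.1
          (am, dir)) (st.2.1, st.2.2)
      (laco, inner.1, inner.2)) (false, false, false)
  if !st.1 && !st.2.1 then some 0
  else if st.2.2 then some 1
  else if !st.1 && st.2.1 then some 2
  else if st.1 && st.2.1 then some 3
  else none

-- ===== PORT B =====
def tipoGrafo_alt (listaAdj : List (Int × List Int)) : Option Int :=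
  let d : PySem.Dict Int (List Int) := PySem.Dict.ofList listaAdj
  let keys : PySem.Set Int := PySem.Set.ofList (PySem.Dict.keys d)
  let adj : PySem.Dict Int (PySem.Set Int) :=
    PySem.Dict.ofList ((PySem.Dict.items d).map (fun p => (p.1, PySem.Set.ofList p.2)))
  let st :=
    (PySem.Dict.items d).foldl (fun (st : Bool × Bool × Bool) p =>
      let v := p.1
      let nb := p.2
      let laco := if (PySem.Dict.getD adj v []).contains v then true else st.1
      let counts : PySem.Dict Int Int :=
        nb.foldl (fun c u => c.insert u (PySem.Dict.getD c u 0 + 1)) PySem.Dict.empty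
      let am := if (PySem.Dict.items counts).any (fun q => decide (q.2 > 1) && keys.contains q.1) then true else st.2.1
      let dir := if (PySem.Dict.getD adj v []).any (fun u => keys.contains u && !((PySem.Dict.getD adj u []).contains v)) then true else st.2.2
      (laco, am, dir)) (false, false, false)
  if !st.1 && !st.2.1 then some 0
  else if st.2.2 then some 1
  else if st.2.1 then (if st.1 then some 3 else some 2)
  else none

-- ===== PRECONDITION & SPEC =====
-- Pre_ excludes association lists with duplicate keys: a Python dict cannot carry them, so which
-- duplicate the dict representation keeps is not a behaviour of A to match.
def Pre_tipoGrafo (listaAdj : List (Int × List Int)) : Prop := (listaAdj.map Prod.fst).Nodup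
instance (listaAdj : List (Int × List Int)) : Decidable (Pre_tipoGrafo listaAdj) := by unfold Pre_tipoGrafo; infer_instance
def pvWitness_tipoGrafo : (List (Int × List Int)) := [(0, [1]), (1, [0])]
def Spec_tipoGrafo (listaAdj : List (Int × List Int)) (out : Option Int) : Prop := out = tipoGrafo_alt listaAdj
instance (listaAdj : List (Int × List Int)) (out : Option Int) : Decidable (Spec_tipoGrafo listaAdj out) := by unfold Spec_tipoGrafo; infer_instance

-- ===== CLAIM (what is proved, stated in full; the proofs are below) =====
def Claim_equal_tipoGrafo : Prop := ∀ (listaAdj : List (Int × List Int)), Dom_tipoGrafo listaAdj → Pre_tipoGrafo listaAdj → Spec_tipoGrafo listaAdj (tipoGrafo listaAdj)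

-- ===== LEMMAS AND PROOFS =====

def pvG (l : List (Int × List Int)) (y : Int) : List Int := (PySem.Dict.ofList l).getD y []
def pvB1 (p : Int × List Int) : Bool := p.2.contains p.1
def pvB2 (l : List (Int × List Int)) (p : Int × List Int) : Bool :=
  (l.map Prod.fst).any (fun y => decide (p.2.count y > 1))
def pvB3 (l : List (Int × List Int)) (p : Int × List Int) : Bool :=
  (l.map Prod.fst).any (fun y => p.2.contains y && !((pvG l y).contains p.1))

theorem ifFold2 {α : Type} (F G : α → Bool) (l : List α) (a b : Bool) :
    l.foldl (fun q y => (F y || q.1, G y || q.2)) (a, b)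
      = (a || l.any F, b || l.any G) := by
  induction l generalizing a b with
  | nil => simp
  | cons x t ih => cases hF : F x <;> cases hG : G x <;> simp [List.foldl_cons, hF, hG, ih]

theorem ifFold3 {α : Type} (F1 F2 F3 : α → Bool) (l : List α) (a b c : Bool) :
    l.foldl (fun st p => (F1 p || st.1, F2 p || st.2.1, F3 p || st.2.2)) (a, b, c)
      = (a || l.any F1, b || l.any F2, c || l.any F3) := by
  induction l generalizing a b c with
  | nil => simp
  | cons x t ih => cases h1 : F1 x <;> cases h2 : F2 x <;> cases h3 : F3 x <;> simp [List.foldl_cons, h1, h2, h3, ih]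

theorem itemsOfList {ν : Type} (l : List (Int × ν)) (h : (l.map Prod.fst).Nodup) :
    (PySem.Dict.ofList l).items = l := by
  have := PySem.Dict.items_foldl_insert_fresh (l := l) (k := Prod.fst) (v := Prod.snd)
    (d := PySem.Dict.empty) (by intro a _; simp [pysem]) h
  simpa using this

theorem keysOfList {ν : Type} (l : List (Int × ν)) (h : (l.map Prod.fst).Nodup) :
    (PySem.Dict.ofList l).keys = l.map Prod.fst := by
  simp [PySem.Dict.keys, itemsOfList l h]

theorem getDOfList {ν : Type} (l : List (Int × ν)) (h : (l.map Prod.fst).Nodup)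
    (p : Int × ν) (hp : p ∈ l) (d0 : ν) : (PySem.Dict.ofList l).getD p.1 d0 = p.2 := by
  apply PySem.Dict.getD_of_mem_items
  · rw [itemsOfList l h]; exact hp
  · rw [keysOfList l h]; exact h

theorem am_eq (nb ks : List Int) :
    ((PySem.Dict.counter nb).items.any (fun q => decide (q.2 > 1) && (PySem.Set.ofList ks).contains q.1))
      = ks.any (fun y => decide (nb.count y > 1)) := by
  rw [PySem.Dict.items_counter, Bool.eq_iff_iff]
  simp only [List.any_map, List.any_eq_true, Function.comp, decide_eq_true_eq, Bool.and_eq_true]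
  constructor
  · rintro ⟨u, hu, hc, hk⟩
    refine ⟨u, ?_, ?_⟩
    · have : (PySem.Set.ofList ks).contains u = true := hk
      simpa [pysem] using this
    · exact_mod_cast hc
  · rintro ⟨y, hy, hc⟩
    refine ⟨y, ?_, ?_, ?_⟩
    · rw [PySem.Set.mem_ofList]
      exact List.count_pos_iff.mp (by omega)
    · exact_mod_cast hc
    · simp [pysem, hy]

theorem dir_eq (ks nb : List Int) (v : Int) (A : PySem.Dict Int (PySem.Set Int)) (G : Int → List Int)
    (hga : ∀ y ∈ ks, A.getD y [] = PySem.Set.ofList (G y)) :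
    ((PySem.Set.ofList nb).any (fun u => (PySem.Set.ofList ks).contains u && !((A.getD u []).contains v)))
      = ks.any (fun y => nb.contains y && !((G y).contains v)) := by
  rw [Bool.eq_iff_iff]
  simp only [List.any_eq_true, Bool.and_eq_true, Bool.not_eq_eq_eq_not, Bool.not_true]
  constructor
  · rintro ⟨u, hu, hk, hnc⟩
    have hks : u ∈ ks := by simpa [pysem] using hk
    refine ⟨u, hks, ?_, ?_⟩
    · simp [(PySem.Set.mem_ofList nb u).mp hu]
    · rw [hga u hks] at hnc
      simpa [pysem] using hnc
  · rintro ⟨y, hy, hnb, hnc⟩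
    refine ⟨y, ?_, ?_, ?_⟩
    · rw [PySem.Set.mem_ofList]; simpa using hnb
    · simp [pysem, hy]
    · rw [hga y hy]
      simpa [pysem] using hnc

theorem tailEq (L M D : Bool) :
    (if !L && !M then some (0:Int) else if D then some 1 else if !L && M then some 2
      else if L && M then some 3 else none)
      = (if !L && !M then some 0 else if D then some 1 else if M then (if L then some 3 else some 2)
      else none) := by
  cases L <;> cases M <;> cases D <;> rfl

theorem ifFold2' {α : Type} (F G : α → Bool) (l : List α) (a b : Bool) :
    l.foldl (fun (q : Bool × Bool) y => (if F y then true else q.1, if G y then true else q.2)) (a, b)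
      = (a || l.any F, b || l.any G) := by
  simp only [Bool.if_true_left, Bool.decide_eq_true]
  exact ifFold2 F G l a b

theorem tipoGrafo_main : ∀ (l : List (Int × List Int)), Pre_tipoGrafo l →
    tipoGrafo l = tipoGrafo_alt l := by
  intro l h
  rw [Pre_tipoGrafo] at h
  have hkeys : (PySem.Dict.ofList l).keys = l.map Prod.fst := keysOfList l h
  have hitems : (PySem.Dict.ofList l).items = l := itemsOfList l h
  have hg : ∀ p ∈ l, (PySem.Dict.ofList l).getD p.1 [] = p.2 :=
    fun p hp => getDOfList l h p hp []
  have hmapnd : ((l.map (fun p => (p.1, PySem.Set.ofList p.2))).map Prod.fst).Nodup := by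
    simpa [List.map_map, Function.comp] using h
  have hgaP : ∀ p ∈ l,
      (PySem.Dict.ofList (l.map (fun p => (p.1, PySem.Set.ofList p.2)))).getD p.1 []
        = PySem.Set.ofList p.2 := by
    intro p hp
    exact getDOfList _ hmapnd (p.1, PySem.Set.ofList p.2) (List.mem_map.mpr ⟨p, hp, rfl⟩) []
  have hgaK : ∀ y ∈ l.map Prod.fst,
      (PySem.Dict.ofList (l.map (fun p => (p.1, PySem.Set.ofList p.2)))).getD y []
        = PySem.Set.ofList (pvG l y) := by
    intro y hy
    obtain ⟨p, hp, rfl⟩ := List.mem_map.mp hy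
    rw [hgaP p hp, pvG, hg p hp]
  have hptA : ∀ (st : Bool × Bool × Bool) (p : Int × List Int), p ∈ l →
      (if ((PySem.Dict.ofList l).getD p.1 []).contains p.1 then true else st.1,
        ((l.map Prod.fst).foldl (fun (q : Bool × Bool) y =>
            (if decide (((PySem.Dict.ofList l).getD p.1 []).count y > 1) then true else q.1,
             if ((PySem.Dict.ofList l).getD p.1 []).contains y && !(((PySem.Dict.ofList l).getD y []).contains p.1) then true else q.2))
          (st.2.1, st.2.2)).1,
        ((l.map Prod.fst).foldl (fun (q : Bool × Bool) y =>
            (if decide (((PySem.Dict.ofList l).getD p.1 []).count y > 1) then true else q.1,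
             if ((PySem.Dict.ofList l).getD p.1 []).contains y && !(((PySem.Dict.ofList l).getD y []).contains p.1) then true else q.2))
          (st.2.1, st.2.2)).2)
      = (pvB1 p || st.1, pvB2 l p || st.2.1, pvB3 l p || st.2.2) := by
    intro st p hp
    simp only [hg p hp]
    rw [ifFold2' (fun y => decide (p.2.count y > 1))
      (fun y => p.2.contains y && !(((PySem.Dict.ofList l).getD y []).contains p.1))]
    simp [pvB1, pvB2, pvB3, pvG, Bool.or_comm]
  have hptB : ∀ (st : Bool × Bool × Bool) (p : Int × List Int), p ∈ l →
      (if ((PySem.Dict.ofList (l.map (fun p => (p.1, PySem.Set.ofList p.2)))).getD p.1 []).contains p.1 then true else st.1,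
        if (p.2.foldl (fun (c : PySem.Dict Int Int) u => c.insert u (c.getD u 0 + 1)) PySem.Dict.empty).items.any
            (fun q => decide (q.2 > 1) && (PySem.Set.ofList (l.map Prod.fst)).contains q.1) then true else st.2.1,
        if ((PySem.Dict.ofList (l.map (fun p => (p.1, PySem.Set.ofList p.2)))).getD p.1 []).any
            (fun u => (PySem.Set.ofList (l.map Prod.fst)).contains u &&
              !(((PySem.Dict.ofList (l.map (fun p => (p.1, PySem.Set.ofList p.2)))).getD u []).contains p.1)) then true else st.2.2)
      = (pvB1 p || st.1, pvB2 l p || st.2.1, pvB3 l p || st.2.2) := by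
    intro st p hp
    rw [PySem.Dict.foldl_insert_getD_add_one_eq_counter, am_eq p.2 (l.map Prod.fst)]
    simp only [hgaP p hp]
    rw [dir_eq (l.map Prod.fst) p.2 p.1 _ (pvG l) hgaK]
    simp [pvB1, pvB2, pvB3, pysem, Bool.or_comm]
  simp only [tipoGrafo, tipoGrafo_alt, hkeys, hitems]
  rw [List.foldl_map]
  rw [PySem.List.foldl_congr_mem _ _ _ _ hptA, PySem.List.foldl_congr_mem _ _ _ _ hptB, ifFold3]
  simp only [Bool.false_or]
  exact tailEq _ _ _

-- ===== VERDICT (by name: the statement is the Claim_ definition above) =====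
theorem tipoGrafo_spec : Claim_equal_tipoGrafo := by
  intro l _ hpre
  exact tipoGrafo_main l hpre
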